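-- pv_equiv track=rewrite | github.com/Wilfred/proper-compiler-hat | bin_hello.py | elf_header_instructions
-- ===== SOURCE A (Python) =====
-- def int_64bit(num):
--     """Return `num` as a list of bytes of its 64-bit representation.
--
--     """
--     assert num >= 0, "Signed numbers are not supported"
--     return list(num.to_bytes(8, 'little'))
--
-- def elf_header_instructions(main_instructions):
--     # The raw bytes of the ELF header. We use strings
--     # for placeholder values computed later.
--     header = [
--         0x7f, 0x45, 0x4c, 0x46, 0x02, 0x01, 0x01, 0x00, # ELF magic number
--         0x00, 0x00, 0x00, 0x00, 0x00, 0x00, 0x00, 0x00, # ELF reserved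
--
--         0x02, 0x00, # e_type: Executable file
--         0x3e, 0x00, # e_machine: AMD64
--         0x01, 0x00, 0x00, 0x00, # e_version: 1
--         0x78, 0x00, 0x40, 0x00, 0x00, 0x00, 0x00, 0x00, # e_entry (program entry address, 0x78, header size + 1)
--         0x40, 0x00, 0x00, 0x00, 0x00, 0x00, 0x00, 0x00, # e_phoff (program header offset, 0x40)
--         0x00, 0x00, 0x00, 0x00, 0x00, 0x00, 0x00, 0x00, # e_shoff (no section headers)
--
--         0x00, 0x00, 0x00, 0x00, # e_flags (no flags)
--         0x40, 0x00, # e_ehsize (ELF header size, 0x40)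
--         0x38, 0x00, # e_phentsize (program header size)
--         0x01, 0x00, # e_phnum
--         0x00, 0x00, # e_shentsize
--         0x00, 0x00, # e_shnum
--         0x00, 0x00, # e_shstrndx
--
--         0x01, 0x00, 0x00, 0x00, # p_type (loadable segment)
--         0x05, 0x00, 0x00, 0x00, # p_flags (read and execute)
--         0x00, 0x00, 0x00, 0x00, 0x00, 0x00, 0x00, 0x00, # p_offset
--         0x00, 0x00, 0x40, 0x00, 0x00, 0x00, 0x00, 0x00, # p_vaddr (start of current section)
--         0x00, 0x00, 0x40, 0x00, 0x00, 0x00, 0x00, 0x00, # p_paddr (start of current section)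
--         'prog_length', # p_filesz, the file size (8 bytes) # WRONG!
--         'prog_length', # p_memsz, the file size (8 bytes)
--         0x00, 0x00, 0x20, 0x00, 0x00, 0x00, 0x00, 0x00, # p_align
--     ]
--
--     result = []
--     for byte in header:
--         if isinstance(byte, int):
--             result.append(byte)
--         elif byte == 'prog_length':
--             result.extend(int_64bit(len(main_instructions)))
--         else:
--             assert False, "Invalid byte in header: {!r}".format(byte)
--
--     return result
-- ===== SOURCE B (Python) =====
-- def int_64bit(num):
--     """Return `num` as a list of bytes of its 64-bit representation."""
--     assert num >= 0, "Signed numbers are not supported"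
--     return list(num.to_bytes(8, 'little'))
--
-- _PREFIX = [
--     0x7f, 0x45, 0x4c, 0x46, 0x02, 0x01, 0x01, 0x00,
--     0x00, 0x00, 0x00, 0x00, 0x00, 0x00, 0x00, 0x00,
--     0x02, 0x00,
--     0x3e, 0x00,
--     0x01, 0x00, 0x00, 0x00,
--     0x78, 0x00, 0x40, 0x00, 0x00, 0x00, 0x00, 0x00,
--     0x40, 0x00, 0x00, 0x00, 0x00, 0x00, 0x00, 0x00,
--     0x00, 0x00, 0x00, 0x00, 0x00, 0x00, 0x00, 0x00,
--     0x00, 0x00, 0x00, 0x00,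
--     0x40, 0x00,
--     0x38, 0x00,
--     0x01, 0x00,
--     0x00, 0x00,
--     0x00, 0x00,
--     0x00, 0x00,
--     0x01, 0x00, 0x00, 0x00,
--     0x05, 0x00, 0x00, 0x00,
--     0x00, 0x00, 0x00, 0x00, 0x00, 0x00, 0x00, 0x00,
--     0x00, 0x00, 0x40, 0x00, 0x00, 0x00, 0x00, 0x00,
--     0x00, 0x00, 0x40, 0x00, 0x00, 0x00, 0x00, 0x00,
-- ]
--
-- _SUFFIX = [0x00, 0x00, 0x20, 0x00, 0x00, 0x00, 0x00, 0x00]  # p_align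
--
-- def elf_header_instructions(main_instructions):
--     length = int_64bit(len(main_instructions))
--     return _PREFIX + length + length + _SUFFIX
-- ===== Notes on version B (the rewrite author's own statement) =====
-- stated objective: simpler
-- what changed: B drops A's placeholder-string markers and the isinstance/string dispatch loop: the header is two fixed byte-list constants, and the result is prefix + int_64bit(len) twice + suffix by plain list concatenation.
import Mathlib
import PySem

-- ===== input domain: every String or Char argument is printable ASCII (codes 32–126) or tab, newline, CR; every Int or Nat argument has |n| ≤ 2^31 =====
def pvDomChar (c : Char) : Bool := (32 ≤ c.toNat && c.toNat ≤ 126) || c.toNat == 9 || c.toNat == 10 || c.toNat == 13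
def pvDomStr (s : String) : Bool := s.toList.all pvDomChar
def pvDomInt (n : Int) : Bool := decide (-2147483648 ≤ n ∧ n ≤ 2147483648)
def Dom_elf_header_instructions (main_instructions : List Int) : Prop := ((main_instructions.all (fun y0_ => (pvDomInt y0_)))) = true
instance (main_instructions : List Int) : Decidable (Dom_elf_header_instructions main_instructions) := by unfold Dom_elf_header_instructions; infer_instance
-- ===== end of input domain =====

-- B replaces A's placeholder-string markers and isinstance/string dispatch loop by two fixed
-- byte-list constants concatenated around the twice-inserted 64-bit length (objective: simpler).

-- ===== PORT A =====
-- int_64bit: num.to_bytes(8,'little'); num is a list length, so num ≥ 0 and the assert never fires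
def int_64bit (num : Nat) : List Int :=
  (List.range 8).map (fun i => ((num / 256 ^ i) % 256 : Nat))

-- header entries are ints or the placeholder string 'prog_length'
def pvHeaderA : List (Int ⊕ String) :=
  [.inl 0x7f, .inl 0x45, .inl 0x4c, .inl 0x46, .inl 0x02, .inl 0x01, .inl 0x01, .inl 0x00,
   .inl 0x00, .inl 0x00, .inl 0x00, .inl 0x00, .inl 0x00, .inl 0x00, .inl 0x00, .inl 0x00,
   .inl 0x02, .inl 0x00,
   .inl 0x3e, .inl 0x00,
   .inl 0x01, .inl 0x00, .inl 0x00, .inl 0x00,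
   .inl 0x78, .inl 0x00, .inl 0x40, .inl 0x00, .inl 0x00, .inl 0x00, .inl 0x00, .inl 0x00,
   .inl 0x40, .inl 0x00, .inl 0x00, .inl 0x00, .inl 0x00, .inl 0x00, .inl 0x00, .inl 0x00,
   .inl 0x00, .inl 0x00, .inl 0x00, .inl 0x00, .inl 0x00, .inl 0x00, .inl 0x00, .inl 0x00,
   .inl 0x00, .inl 0x00, .inl 0x00, .inl 0x00,
   .inl 0x40, .inl 0x00,
   .inl 0x38, .inl 0x00,
   .inl 0x01, .inl 0x00,
   .inl 0x00, .inl 0x00,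
   .inl 0x00, .inl 0x00,
   .inl 0x00, .inl 0x00,
   .inl 0x01, .inl 0x00, .inl 0x00, .inl 0x00,
   .inl 0x05, .inl 0x00, .inl 0x00, .inl 0x00,
   .inl 0x00, .inl 0x00, .inl 0x00, .inl 0x00, .inl 0x00, .inl 0x00, .inl 0x00, .inl 0x00,
   .inl 0x00, .inl 0x00, .inl 0x40, .inl 0x00, .inl 0x00, .inl 0x00, .inl 0x00, .inl 0x00,
   .inl 0x00, .inl 0x00, .inl 0x40, .inl 0x00, .inl 0x00, .inl 0x00, .inl 0x00, .inl 0x00,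
   .inr "prog_length",
   .inr "prog_length",
   .inl 0x00, .inl 0x00, .inl 0x20, .inl 0x00, .inl 0x00, .inl 0x00, .inl 0x00, .inl 0x00]

def elf_header_instructions (main_instructions : List Int) : List Int :=
  pvHeaderA.foldl (fun result byte =>
    match byte with
    | .inl b => result ++ [b]
    | .inr s =>
      if s = "prog_length" then result ++ int_64bit main_instructions.length
      else result  -- 'assert False' branch; unreachable, no other strings occur
    ) []

-- ===== PORT B =====
def pvPrefixB : List Int :=
  [0x7f, 0x45, 0x4c, 0x46, 0x02, 0x01, 0x01, 0x00,
   0x00, 0x00, 0x00, 0x00, 0x00, 0x00, 0x00, 0x00,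
   0x02, 0x00, 0x3e, 0x00, 0x01, 0x00, 0x00, 0x00,
   0x78, 0x00, 0x40, 0x00, 0x00, 0x00, 0x00, 0x00,
   0x40, 0x00, 0x00, 0x00, 0x00, 0x00, 0x00, 0x00,
   0x00, 0x00, 0x00, 0x00, 0x00, 0x00, 0x00, 0x00,
   0x00, 0x00, 0x00, 0x00, 0x40, 0x00, 0x38, 0x00,
   0x01, 0x00, 0x00, 0x00, 0x00, 0x00, 0x00, 0x00,
   0x01, 0x00, 0x00, 0x00, 0x05, 0x00, 0x00, 0x00,
   0x00, 0x00, 0x00, 0x00, 0x00, 0x00, 0x00, 0x00,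
   0x00, 0x00, 0x40, 0x00, 0x00, 0x00, 0x00, 0x00,
   0x00, 0x00, 0x40, 0x00, 0x00, 0x00, 0x00, 0x00]

def pvSuffixB : List Int := [0x00, 0x00, 0x20, 0x00, 0x00, 0x00, 0x00, 0x00]

def elf_header_instructions_alt (main_instructions : List Int) : List Int :=
  let length := int_64bit main_instructions.length
  pvPrefixB ++ length ++ length ++ pvSuffixB

-- ===== PRECONDITION & SPEC =====
def Spec_elf_header_instructions (main_instructions : List Int) (out : List Int) : Prop := out = elf_header_instructions_alt main_instructions
instance (main_instructions : List Int) (out : List Int) : Decidable (Spec_elf_header_instructions main_instructions out) := by unfold Spec_elf_header_instructions; infer_instance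

-- ===== CLAIM (what is proved, stated in full; the proofs are below) =====
def Claim_equal_elf_header_instructions : Prop := ∀ (main_instructions : List Int), Dom_elf_header_instructions main_instructions → Spec_elf_header_instructions main_instructions (elf_header_instructions main_instructions)

-- ===== LEMMAS AND PROOFS =====

-- ===== VERDICT (by name: the statement is the Claim_ definition above) =====
set_option maxRecDepth 4000 in
theorem elf_header_instructions_spec : Claim_equal_elf_header_instructions := by
  intro m _
  unfold Spec_elf_header_instructions elf_header_instructions elf_header_instructions_alt
  simp [pvHeaderA, pvPrefixB, pvSuffixB, List.foldl]
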